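-- pv_equiv track=rewrite | github.com/dylanelznic/Class-Projects | cs3500/progparser.py | isDec
-- ===== SOURCE A (Python) =====
-- def isDec(token):
-- 	#Check for prefix '+' or '-' in string, then remove it
-- 	for prefix in ['+','-']:
-- 		if prefix in token:
-- 			token = token.replace(prefix, '')
--
-- 	#Check for decimal within number, then remove it
-- 	for char in token:
-- 		if char == '.':
-- 			token = token.replace(char, '')
--
-- 	if token.isdigit():
-- 		return True
-- ===== SOURCE B (Python) =====
-- def isDec(token):
--     digits = 0
--     for c in token:
--         if c in '+-.':
--             continue
--         elif c.isdigit():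
--             digits += 1
--         else:
--             return None
--     if digits > 0:
--         return True
--     return None
-- ===== Notes on version B (the rewrite author's own statement) =====
-- stated objective: simpler
-- what changed: Replaces A's repeated in/replace passes (and the dot-removal loop that iterates over the string while rewriting it) by a single pass over the characters that counts digits, skips sign/dot characters, and bails out on anything else.
import Mathlib
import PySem

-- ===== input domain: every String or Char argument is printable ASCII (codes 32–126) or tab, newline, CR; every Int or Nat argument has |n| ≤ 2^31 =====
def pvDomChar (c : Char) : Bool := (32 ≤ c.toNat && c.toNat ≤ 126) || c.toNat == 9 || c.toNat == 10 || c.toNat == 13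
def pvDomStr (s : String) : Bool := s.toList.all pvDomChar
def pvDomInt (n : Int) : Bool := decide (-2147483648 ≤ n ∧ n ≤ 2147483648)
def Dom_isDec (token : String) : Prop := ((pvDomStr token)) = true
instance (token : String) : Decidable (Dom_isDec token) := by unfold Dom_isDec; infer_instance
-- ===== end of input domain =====

-- B replaces A's repeated in/replace passes by a single digit-counting pass over the characters (objective: simpler).

-- ===== PORT A =====
-- A: remove '+'/'-' (replace, guarded by 'in'), then remove '.' (a loop over the string
-- that rewrites it via replace), then token.isdigit() → True, else fall through → None.
def isDec (token : String) : Option Bool :=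
  let t1 := ['+', '-'].foldl
    (fun t p => if PySem.Chars.isIn [p] t then PySem.Chars.replace t [p] [] else t)
    token.toList
  -- Python iterates over the string value t1 held at loop entry while reassigning token
  let t2 := t1.foldl
    (fun t c => if c == '.' then PySem.Chars.replace t ['.'] [] else t) t1
  if PySem.Chars.strIsdigit t2 then some true else none

-- ===== PORT B =====
-- B: one pass, Option-valued accumulator = early 'return None'; count of digits seen.
def isDecAltStep (acc : Option Nat) (c : Char) : Option Nat :=
  match acc with
  | none => none
  | some n =>
    if c == '+' || c == '-' || c == '.' then some n
    else if PySem.Chars.isdigit c then some (n + 1)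
    else none

def isDec_alt (token : String) : Option Bool :=
  match token.toList.foldl isDecAltStep (some 0) with
  | none => none
  | some n => if n > 0 then some true else none

-- ===== PRECONDITION & SPEC =====
def Spec_isDec (token : String) (out : Option Bool) : Prop := out = isDec_alt token
instance (token : String) (out : Option Bool) : Decidable (Spec_isDec token out) := by
  unfold Spec_isDec; infer_instance

-- ===== CLAIM (what is proved, stated in full; the proofs are below) =====
def Claim_equal_isDec : Prop := ∀ (token : String), Dom_isDec token → Spec_isDec token (isDec token)

-- ===== LEMMAS AND PROOFS =====

def pvSignDot (c : Char) : Bool := c == '+' || c == '-' || c == '.'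

theorem replace_go_single (c : Char) :
    ∀ (fuel : Nat) (l acc : List Char), l.length ≤ fuel →
      PySem.Chars.replace.go [c] [] fuel l acc
        = acc.reverse ++ l.filter (fun x => x != c) := by
  intro fuel
  induction fuel with
  | zero =>
    intro l acc h
    have : l = [] := List.eq_nil_of_length_eq_zero (Nat.le_zero.mp h)
    subst this; simp [PySem.Chars.replace.go]
  | succ n ih =>
    intro l acc h
    cases l with
    | nil => simp [PySem.Chars.replace.go]
    | cons a t =>
      by_cases hac : a = c
      · subst hac
        have hp : ([a].isPrefixOf (a :: t)) = true := by simp [List.isPrefixOf]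
        simp only [PySem.Chars.replace.go, hp, if_pos, List.length_cons,
          List.length_nil, List.drop_succ_cons, List.drop_zero, List.reverse_nil,
          List.nil_append]
        rw [ih t acc (by simpa using Nat.le_of_succ_le_succ h)]
        simp
      · have hca : (c == a) = false := beq_eq_false_iff_ne.mpr (Ne.symm hac)
        have hp : ([c].isPrefixOf (a :: t)) = false := by
          simp [List.isPrefixOf, hca]
        simp only [PySem.Chars.replace.go, hp]
        rw [if_neg (by simp [hp])]
        rw [ih t (a :: acc) (by simpa using Nat.le_of_succ_le_succ h)]
        simp [hac]

theorem replace_single_eq_filter (c : Char) (l : List Char) :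
    PySem.Chars.replace l [c] [] = l.filter (fun x => x != c) := by
  have he : ([c] : List Char).isEmpty = false := rfl
  unfold PySem.Chars.replace
  rw [he]
  simpa using replace_go_single c l.length l [] (le_refl _)

theorem guarded_replace_eq_filter (c : Char) (l : List Char) :
    (if PySem.Chars.isIn [c] l then PySem.Chars.replace l [c] [] else l)
      = l.filter (fun x => x != c) := by
  by_cases h : PySem.Chars.isIn [c] l = true
  · rw [if_pos h, replace_single_eq_filter]
  · rw [if_neg h]
    have hni : c ∉ l := by
      intro hm
      apply h
      rw [PySem.Chars.isIn_iff_infix]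
      obtain ⟨s, t, rfl⟩ := List.append_of_mem hm
      exact ⟨s, t, by simp⟩
    symm
    apply List.filter_eq_self.mpr
    intro a ha; simp; intro he; exact hni (he ▸ ha)

theorem dot_fold_eq (iter : List Char) (t : List Char) :
    iter.foldl (fun t c => if c == '.' then PySem.Chars.replace t ['.'] [] else t) t
      = if '.' ∈ iter then t.filter (fun x => x != '.') else t := by
  induction iter generalizing t with
  | nil => simp
  | cons a rest ih =>
    by_cases ha : a = '.'
    · subst ha
      simp only [List.foldl_cons, beq_self_eq_true, if_pos, List.mem_cons, true_or]
      rw [replace_single_eq_filter, ih]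
      split_ifs with h
      · rw [List.filter_filter]; simp
      · rfl
    · simp only [List.foldl_cons]
      rw [if_neg (by simp [ha]), ih]
      simp [Ne.symm ha]

theorem isDec_closed (token : String) :
    isDec token
      = if PySem.Chars.strIsdigit
            (token.toList.filter (fun c => !pvSignDot c))
        then some true else none := by
  have hfin :
      ((token.toList.filter (fun x => x != '+')).filter (fun x => x != '-')).filter
          (fun x => x != '.')
        = token.toList.filter (fun c => !pvSignDot c) := by
    rw [List.filter_filter, List.filter_filter]
    apply List.filter_congr
    intro a _
    simp only [pvSignDot, Bool.not_or, bne]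
    cases a == '+' <;> cases a == '-' <;> cases a == '.' <;> rfl
  unfold isDec
  simp only [List.foldl_cons, List.foldl_nil, guarded_replace_eq_filter, dot_fold_eq]
  by_cases hd : '.' ∈ (token.toList.filter (fun x => x != '+')).filter (fun x => x != '-')
  · rw [if_pos hd]
    simp only [hfin]
  · rw [if_neg hd]
    have hself :
        (token.toList.filter (fun x => x != '+')).filter (fun x => x != '-')
          = token.toList.filter (fun c => !pvSignDot c) := by
      rw [← hfin]
      symm
      apply List.filter_eq_self.mpr
      intro a ha; simp; intro he; exact hd (he ▸ ha)
    simp only [hself]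

theorem isDecAltStep_none (l : List Char) : l.foldl isDecAltStep none = none := by
  induction l with
  | nil => rfl
  | cons a t ih => simpa [isDecAltStep] using ih

theorem alt_fold_char (l : List Char) :
    ∀ n : Nat, l.foldl isDecAltStep (some n)
      = if l.all (fun c => pvSignDot c || PySem.Chars.isdigit c)
        then some (n + l.countP (fun c => !pvSignDot c && PySem.Chars.isdigit c))
        else none := by
  induction l with
  | nil => intro n; simp
  | cons a t ih =>
    intro n
    by_cases hs : pvSignDot a = true
    · simp only [List.foldl_cons, isDecAltStep]
      rw [if_pos (by simpa [pvSignDot] using hs)]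
      rw [ih n]
      simp [hs, List.countP_cons]
    · by_cases hdg : PySem.Chars.isdigit a = true
      · simp only [List.foldl_cons, isDecAltStep]
        rw [if_neg (by simpa [pvSignDot] using hs), if_pos hdg, ih (n + 1),
          List.countP_cons]
        simp only [List.all_cons, hs, hdg, Bool.false_or, Bool.not_false,
          Bool.true_and, if_pos, Bool.true_and]
        split_ifs with h
        · exact congrArg some (by omega)
        · rfl
      · simp only [List.foldl_cons, isDecAltStep]
        rw [if_neg (by simpa [pvSignDot] using hs), if_neg hdg]
        rw [isDecAltStep_none]
        simp [hs, hdg]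

-- ===== VERDICT (by name: the statement is the Claim_ definition above) =====
theorem isDec_spec : Claim_equal_isDec := by
  unfold Claim_equal_isDec
  intro token _
  unfold Spec_isDec
  rw [isDec_closed]
  unfold isDec_alt
  rw [alt_fold_char]
  by_cases hall : (token.toList.all (fun c => pvSignDot c || PySem.Chars.isdigit c)) = true
  · rw [if_pos hall]
    have hdig : (token.toList.filter (fun c => !pvSignDot c)).all PySem.Chars.isdigit = true := by
      rw [List.all_eq_true]
      intro c hc
      rw [List.mem_filter] at hc
      have := (List.all_eq_true.mp hall) c hc.1
      rcases Bool.or_eq_true_iff.mp this with h | h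
      · rw [h] at hc; exact absurd hc.2 (by simp)
      · exact h
    have hcnt : token.toList.countP (fun c => !pvSignDot c && PySem.Chars.isdigit c)
        = (token.toList.filter (fun c => !pvSignDot c)).length := by
      rw [← List.countP_eq_length_filter]
      apply List.countP_congr
      intro c hc
      have := (List.all_eq_true.mp hall) c hc
      rcases Bool.or_eq_true_iff.mp this with h | h
      · simp [h]
      · simp [h]
    by_cases hne : (token.toList.filter (fun c => !pvSignDot c)).length = 0
    · rw [if_neg]
      · have hc0 : token.toList.countP (fun c => !pvSignDot c && PySem.Chars.isdigit c) = 0 := by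
          rw [hcnt, hne]
        simp [hc0]
      · intro hcontra
        unfold PySem.Chars.strIsdigit at hcontra
        rw [Bool.and_eq_true_iff] at hcontra
        have h1 := hcontra.1
        rw [Bool.not_eq_eq_eq_not, Bool.not_true, List.isEmpty_eq_false_iff] at h1
        exact h1 (List.eq_nil_of_length_eq_zero hne)
    · rw [if_pos]
      · simp only [Nat.zero_add, hcnt]
        rw [if_pos (by omega)]
      · unfold PySem.Chars.strIsdigit
        rw [Bool.and_eq_true_iff]
        constructor
        · rw [Bool.not_eq_eq_eq_not, Bool.not_true, List.isEmpty_eq_false_iff]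
          intro h; exact hne (by rw [h]; rfl)
        · exact hdig
  · rw [if_neg hall, if_neg]
    intro hcontra
    apply hall
    unfold PySem.Chars.strIsdigit at hcontra
    rw [Bool.and_eq_true_iff] at hcontra
    rw [List.all_eq_true]
    intro c hc
    by_cases hs : pvSignDot c = true
    · simp [hs]
    · have hcf : c ∈ token.toList.filter (fun c => !pvSignDot c) :=
        List.mem_filter.mpr ⟨hc, by simp [hs]⟩
      have := (List.all_eq_true.mp hcontra.2) c hcf
      simp [this]
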